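-- pv_equiv track=rewrite | github.com/unicamp-dl/Lissard | src/repeat_copy_logic/english.py | x_all_the_world
-- ===== SOURCE A (Python) =====
-- def x_all_the_world(times):
--     '''
--     Repeat all the world seven times, and after every second time add is a stage.
--     '''
--     out = ''
--     count = 0
--     range_ = int(times/2)
--     for x in range(0, times+range_):
--         if count == 2:
--             out+='is a stage '
--             count=0
--         else:
--             out+='all the world '
--             count+=1
--     return out.strip()
-- ===== SOURCE B (Python) =====
-- def x_all_the_world(times):
--     n = times + int(times / 2)
--     if n <= 0:
--         return ''
--     full, rem = divmod(n, 3)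
--     s = 'all the world all the world is a stage ' * full + 'all the world ' * rem
--     return s.strip()
-- ===== Notes on version B (the rewrite author's own statement) =====
-- stated objective: faster
-- what changed: Replaces the per-iteration counter state machine growing the string one phrase at a time with closed-form block arithmetic: divmod(n,3) yields how many full 'all the world all the world is a stage ' blocks and leftover 'all the world ' phrases, assembled by string repetition.
import Mathlib
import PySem

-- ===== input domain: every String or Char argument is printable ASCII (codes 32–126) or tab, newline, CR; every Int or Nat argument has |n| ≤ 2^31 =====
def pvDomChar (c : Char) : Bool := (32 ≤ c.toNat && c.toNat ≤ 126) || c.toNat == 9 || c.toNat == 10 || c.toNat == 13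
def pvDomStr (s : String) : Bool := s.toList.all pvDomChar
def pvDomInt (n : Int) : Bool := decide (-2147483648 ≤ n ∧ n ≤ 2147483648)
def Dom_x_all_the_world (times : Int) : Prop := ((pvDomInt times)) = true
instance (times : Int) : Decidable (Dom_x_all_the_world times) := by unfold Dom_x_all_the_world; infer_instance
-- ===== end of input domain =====

-- B replaces A's per-iteration counter state machine by closed-form divmod block arithmetic (same return value).

-- ===== PORT A =====
-- int(times/2): true division then truncation toward zero; exact on |times| ≤ 2^31, so Int.tdiv.
def x_all_the_world (times : Int) : String :=
  PySem.Str.strip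
    ((PySem.List.pyRange 0 (times + times.tdiv 2) 1).foldl
      (fun (st : String × Int) _ =>
        if st.2 = 2 then (st.1 ++ "is a stage ", 0)
        else (st.1 ++ "all the world ", st.2 + 1))
      ("", 0)).1

-- ===== PORT B =====
def x_all_the_world_alt (times : Int) : String :=
  if times + times.tdiv 2 ≤ 0 then ""
  else
    PySem.Str.strip
      (String.join (List.replicate (PySem.Int.floordiv (times + times.tdiv 2) 3).toNat
          "all the world all the world is a stage ") ++
       String.join (List.replicate (PySem.Int.mod (times + times.tdiv 2) 3).toNat
          "all the world "))

-- ===== PRECONDITION & SPEC =====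
def Spec_x_all_the_world (times : Int) (out : String) : Prop := out = x_all_the_world_alt times
instance (times : Int) (out : String) : Decidable (Spec_x_all_the_world times out) := by unfold Spec_x_all_the_world; infer_instance

-- ===== CLAIM (what is proved, stated in full; the proofs are below) =====
def Claim_equal_x_all_the_world : Prop := ∀ (times : Int), Dom_x_all_the_world times → Spec_x_all_the_world times (x_all_the_world times)

-- ===== LEMMAS AND PROOFS =====

-- A's loop body, as a function of the state only (it ignores the range element).
def pvStep (st : String × Int) : String × Int :=
  if st.2 = 2 then (st.1 ++ "is a stage ", 0)
  else (st.1 ++ "all the world ", st.2 + 1)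

lemma pvFoldl_eq_iterate (l : List Int) (st : String × Int) :
    l.foldl (fun (st : String × Int) _ =>
        if st.2 = 2 then (st.1 ++ "is a stage ", 0)
        else (st.1 ++ "all the world ", st.2 + 1)) st
      = pvStep^[l.length] st := by
  induction l generalizing st with
  | nil => rfl
  | cons x xs ih =>
      simp only [List.foldl_cons, List.length_cons, Function.iterate_succ_apply, ih]
      rfl

lemma pvFoldl_append (l : List String) : ∀ a b : String,
    l.foldl (fun r s => r ++ s) (a ++ b) = a ++ l.foldl (fun r s => r ++ s) b := by
  induction l with
  | nil => intro a b; rfl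
  | cons x xs ih =>
      intro a b
      simp only [List.foldl_cons, String.append_assoc, ih]

lemma pvJoin_cons (x : String) (l : List String) :
    String.join (x :: l) = x ++ String.join l := by
  have h := pvFoldl_append l x ""
  simp only [String.join, List.foldl_cons]
  rw [show ("" ++ x : String) = x ++ "" by simp]
  exact h

lemma pvJoinRep_comm (q : Nat) (x : String) :
    String.join (List.replicate q x) ++ x = x ++ String.join (List.replicate q x) := by
  induction q with
  | zero => simp [String.join]
  | succ q ih =>
      simp only [List.replicate_succ, pvJoin_cons, String.append_assoc]
      rw [ih]

-- after 3·q steps from count 0 the string has grown by q full blocks and the count is 0 again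
lemma pvIterate_three_mul (q : Nat) (s : String) :
    pvStep^[3 * q] (s, 0) =
      (s ++ String.join (List.replicate q "all the world all the world is a stage "), 0) := by
  induction q generalizing s with
  | zero => simp [String.join]
  | succ q ih =>
      have h3 : 3 * (q + 1) = 3 + 3 * q := by ring
      rw [h3, Function.iterate_add_apply]
      have hstep : ∀ t : String, pvStep^[3] (t, (0 : Int)) = (t ++ "all the world " ++ "all the world " ++ "is a stage ", 0) := by
        intro t; simp [pvStep, Function.iterate_succ_apply]
      rw [ih, hstep]
      have hP : ("all the world " ++ ("all the world " ++ "is a stage ") : String)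
          = "all the world all the world is a stage " := rfl
      simp only [List.replicate_succ, pvJoin_cons, String.append_assoc, hP]
      rw [pvJoinRep_comm]

-- ===== VERDICT (by name: the statement is the Claim_ definition above) =====
theorem x_all_the_world_spec : Claim_equal_x_all_the_world := by
  intro times _
  unfold Spec_x_all_the_world x_all_the_world x_all_the_world_alt
  rw [pvFoldl_eq_iterate]
  set n : Int := times + times.tdiv 2 with hn
  by_cases hle : n ≤ 0
  · rw [PySem.List.pyRange_one_eq_nil hle]
    simp [hle]
    rfl
  · simp only [if_neg hle]
    rw [not_le] at hle
    rw [PySem.List.length_pyRange_one]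
    rw [PySem.Int.floordiv_eq_ediv_of_pos (a := n) (by norm_num : (0:Int) < 3),
        PySem.Int.mod_eq_emod_of_pos (a := n) (by norm_num : (0:Int) < 3)]
    have hsplit : (n - 0).toNat = (n % 3).toNat + 3 * (n / 3).toNat := by omega
    rw [hsplit, Function.iterate_add_apply, pvIterate_three_mul]
    have hr : (n % 3).toNat = 0 ∨ (n % 3).toNat = 1 ∨ (n % 3).toNat = 2 := by omega
    rcases hr with h | h | h <;>
      simp [h, pvStep, Function.iterate_succ_apply, String.join, String.append_assoc]
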